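-- pv_equiv track=rewrite | github.com/conda/grayskull | grayskull/strategy/pypi.py | sort_reqs
-- ===== SOURCE A (Python) =====
-- from collections.abc import Iterable, MutableMapping
--
-- def sort_reqs(reqs: Iterable[str], alphabetize: bool = False) -> list[str]:
--     """Sort requirements. Put python first, then optionally sort alphabetically."""
--     reqs_list = list(reqs)
--
--     def is_python(req: str) -> bool:
--         return req == "python" or req.startswith("python ")
--
--     python_reqs = [req for req in reqs_list if is_python(req)]
--     non_python_reqs = [req for req in reqs_list if not is_python(req)]
--     if alphabetize:
--         non_python_reqs.sort()
--     result = python_reqs + non_python_reqs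
--     return result
-- ===== SOURCE B (Python) =====
-- def sort_reqs(reqs, alphabetize=False):
--     """Sort requirements. Put python first, then optionally sort alphabetically."""
--     def key(req):
--         if req == "python" or req.startswith("python "):
--             return (0, "")
--         return (1, req) if alphabetize else (1, "")
--     return sorted(reqs, key=key)
-- ===== Notes on version B (the rewrite author's own statement) =====
-- stated objective: idiomatic
-- what changed: Replaces the two partition comprehensions plus conditional in-place sort and concatenation with a single stable sorted() call whose key flags python-reqs first and alphabetizes the rest only when requested.
import Mathlib
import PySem

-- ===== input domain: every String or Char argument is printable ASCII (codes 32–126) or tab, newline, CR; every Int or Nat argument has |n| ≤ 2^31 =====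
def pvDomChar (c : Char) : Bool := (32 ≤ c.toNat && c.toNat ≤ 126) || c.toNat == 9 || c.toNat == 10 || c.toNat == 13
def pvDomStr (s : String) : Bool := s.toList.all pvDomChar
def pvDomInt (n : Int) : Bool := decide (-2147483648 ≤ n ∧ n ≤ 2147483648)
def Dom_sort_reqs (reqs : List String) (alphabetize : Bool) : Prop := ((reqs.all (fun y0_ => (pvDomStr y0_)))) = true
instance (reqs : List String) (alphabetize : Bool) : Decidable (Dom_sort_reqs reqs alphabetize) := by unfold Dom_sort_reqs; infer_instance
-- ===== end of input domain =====

-- B replaces the partition-then-concat structure by one stable keyed sorted() call (objective: idiomatic).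

-- the python-requirement test both Pythons perform (A's is_python, B's key's condition)
def pvIsPy (req : String) : Bool := req == "python" || PySem.Str.startswith req "python "

-- ===== PORT A =====
def sort_reqs (reqs : List String) (alphabetize : Bool) : List String :=
  let reqs_list := reqs
  let python_reqs := reqs_list.filter (fun req => pvIsPy req)
  let non_python_reqs := reqs_list.filter (fun req => !pvIsPy req)
  let non_python_reqs :=
    if alphabetize then PySem.List.sorted non_python_reqs (fun r => r) false else non_python_reqs
  python_reqs ++ non_python_reqs

-- ===== PORT B =====
def sort_reqs_alt (reqs : List String) (alphabetize : Bool) : List String :=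
  PySem.List.sorted2 reqs
    (fun req => if pvIsPy req then (0 : Int) else 1)
    (fun req => if pvIsPy req then "" else if alphabetize then req else "")
    false

-- ===== PRECONDITION & SPEC =====
def Spec_sort_reqs (reqs : List String) (alphabetize : Bool) (out : List String) : Prop := out = sort_reqs_alt reqs alphabetize
instance (reqs : List String) (alphabetize : Bool) (out : List String) : Decidable (Spec_sort_reqs reqs alphabetize out) := by unfold Spec_sort_reqs; infer_instance

-- ===== CLAIM (what is proved, stated in full; the proofs are below) =====
def Claim_equal_sort_reqs : Prop := ∀ (reqs : List String) (alphabetize : Bool), Dom_sort_reqs reqs alphabetize → Spec_sort_reqs reqs alphabetize (sort_reqs reqs alphabetize)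

-- ===== LEMMAS AND PROOFS =====

-- the tuple comparator sorted2 uses for B's key
def pvB2 (alpha : Bool) (a b : String) : Bool :=
  decide ((if pvIsPy a then (0 : Int) else 1) < (if pvIsPy b then (0 : Int) else 1)) ||
  (!decide ((if pvIsPy b then (0 : Int) else 1) < (if pvIsPy a then (0 : Int) else 1)) &&
   decide ((if pvIsPy a then "" else if alpha then a else "") < (if pvIsPy b then "" else if alpha then b else "")))

lemma pvB2_py_py {a : Bool} {x y : String} (hx : pvIsPy x = true) (hy : pvIsPy y = true) :
    pvB2 a x y = false := by simp [pvB2, hx, hy]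

lemma pvB2_py_non {a : Bool} {x y : String} (hx : pvIsPy x = true) (hy : pvIsPy y = false) :
    pvB2 a x y = true := by simp [pvB2, hx, hy]

lemma pvB2_non_py {a : Bool} {x y : String} (hx : pvIsPy x = false) (hy : pvIsPy y = true) :
    pvB2 a x y = false := by simp [pvB2, hx, hy]

lemma pvB2_non_non {a : Bool} {x y : String} (hx : pvIsPy x = false) (hy : pvIsPy y = false) :
    pvB2 a x y = decide ((if a then x else "") < (if a then y else "")) := by
  simp [pvB2, hx, hy]

lemma insertBy_front {α : Type} (b : α → α → Bool) (x : α) (ys : List α)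
    (h : ∀ y ∈ ys, b x y = true) : PySem.List.insertBy b x ys = x :: ys := by
  cases ys with
  | nil => rfl
  | cons y t => simp [PySem.List.insertBy, h y (List.mem_cons_self)]

lemma insertBy_skip {α : Type} (b : α → α → Bool) (x : α) (P N : List α)
    (h : ∀ y ∈ P, b x y = false) :
    PySem.List.insertBy b x (P ++ N) = P ++ PySem.List.insertBy b x N := by
  induction P with
  | nil => rfl
  | cons p t ih =>
    simp only [List.cons_append, PySem.List.insertBy, h p (List.mem_cons_self)]
    simp only [Bool.false_eq_true, if_false]
    exact congrArg (p :: ·) (ih fun y hy => h y (List.mem_cons_of_mem _ hy))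

lemma insertBy_end {α : Type} (b : α → α → Bool) (x : α) (N : List α)
    (h : ∀ y ∈ N, b x y = false) : PySem.List.insertBy b x N = N ++ [x] := by
  induction N with
  | nil => rfl
  | cons y t ih =>
    simp only [PySem.List.insertBy, h y (List.mem_cons_self), Bool.false_eq_true, if_false]
    exact congrArg (y :: ·) (ih fun z hz => h z (List.mem_cons_of_mem _ hz))

lemma insertBy_congr {α : Type} (b b' : α → α → Bool) (x : α) (ys : List α)
    (h : ∀ y ∈ ys, b x y = b' x y) :
    PySem.List.insertBy b x ys = PySem.List.insertBy b' x ys := by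
  induction ys with
  | nil => rfl
  | cons y t ih =>
    simp only [PySem.List.insertBy, h y (List.mem_cons_self)]
    split
    · rfl
    · exact congrArg (y :: ·) (ih fun z hz => h z (List.mem_cons_of_mem _ hz))

-- the foldl form of B's sorted2 call
lemma alt_eq_foldl (reqs : List String) (alpha : Bool) :
    sort_reqs_alt reqs alpha =
      reqs.foldl (fun acc x => PySem.List.insertBy (pvB2 alpha) x acc) [] := rfl

-- alphabetize = true: the keyed stable sort is python-filter ++ sorted(non-python)
lemma main_true (reqs : List String) :
    reqs.foldl (fun acc x => PySem.List.insertBy (pvB2 true) x acc) [] =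
      reqs.filter (fun r => pvIsPy r) ++
        PySem.List.sorted (reqs.filter (fun r => !pvIsPy r)) (fun r => r) false := by
  induction reqs using List.reverseRecOn with
  | nil => rfl
  | append_singleton xs x ih =>
    rw [List.foldl_append, List.foldl_cons, List.foldl_nil, ih]
    by_cases hx : pvIsPy x = true
    · rw [insertBy_skip _ _ _ _ (fun y hy => pvB2_py_py hx (by simpa using List.of_mem_filter hy))]
      rw [insertBy_front _ _ _ (fun y hy => by
        have hm : y ∈ xs.filter (fun r => !pvIsPy r) := (PySem.List.mem_sorted _ _ _ _).1 hy
        exact pvB2_py_non hx (by simpa using List.of_mem_filter hm))]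
      simp [List.filter_append, hx]
    · rw [insertBy_skip _ _ _ _ (fun y hy => pvB2_non_py (by simpa using hx) (by simpa using List.of_mem_filter hy))]
      rw [insertBy_congr (pvB2 true) (fun a b => decide (a < b)) _ _ (fun y hy => by
        have hm : y ∈ xs.filter (fun r => !pvIsPy r) := (PySem.List.mem_sorted _ _ _ _).1 hy
        simpa using pvB2_non_non (a := true) (by simpa using hx) (by simpa using List.of_mem_filter hm))]
      rw [show (PySem.List.insertBy (fun a b => decide (a < b)) x
            (PySem.List.sorted (xs.filter (fun r => !pvIsPy r)) (fun r => r) false)) =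
          PySem.List.sorted (xs.filter (fun r => !pvIsPy r) ++ [x]) (fun r => r) false from by
        rw [PySem.List.sorted_eq_foldl_insertBy, PySem.List.sorted_eq_foldl_insertBy,
          List.foldl_append, List.foldl_cons, List.foldl_nil]]
      simp [List.filter_append, hx]

-- alphabetize = false: the keyed stable sort is python-filter ++ non-python-filter
lemma main_false (reqs : List String) :
    reqs.foldl (fun acc x => PySem.List.insertBy (pvB2 false) x acc) [] =
      reqs.filter (fun r => pvIsPy r) ++ reqs.filter (fun r => !pvIsPy r) := by
  induction reqs using List.reverseRecOn with
  | nil => rfl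
  | append_singleton xs x ih =>
    rw [List.foldl_append, List.foldl_cons, List.foldl_nil, ih]
    by_cases hx : pvIsPy x = true
    · rw [insertBy_skip _ _ _ _ (fun y hy => pvB2_py_py hx (by simpa using List.of_mem_filter hy))]
      rw [insertBy_front _ _ _ (fun y hy => pvB2_py_non hx (by simpa using List.of_mem_filter hy))]
      simp [List.filter_append, hx]
    · rw [insertBy_skip _ _ _ _ (fun y hy => pvB2_non_py (by simpa using hx) (by simpa using List.of_mem_filter hy))]
      rw [insertBy_end _ _ _ (fun y hy => by
        have := pvB2_non_non (a := false) (by simpa using hx)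
          (show pvIsPy y = false by simpa using List.of_mem_filter hy)
        simpa using this)]
      simp [List.filter_append, hx]

-- ===== VERDICT (by name: the statement is the Claim_ definition above) =====
theorem sort_reqs_spec : Claim_equal_sort_reqs := by
  intro reqs alphabetize _
  unfold Spec_sort_reqs sort_reqs
  rw [alt_eq_foldl]
  cases alphabetize with
  | false => simpa using (main_false reqs).symm
  | true => simpa using (main_true reqs).symm
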